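-- pv_equiv track=rewrite | github.com/Azure/azure-sdk-for-js | common/tools/sdk-chat/src/PublicApiGraphEngine.Python/graph_api.py | _unwrap_async_return_type
-- ===== SOURCE A (Python) =====
-- def _unwrap_async_return_type(ret_type: str) -> str:
--     """Unwrap async wrapper types: Awaitable[X] → X, Coroutine[..., X] → X."""
--     for wrapper in ("Awaitable", "Coroutine", "AsyncIterator", "AsyncIterable"):
--         if ret_type.startswith(wrapper + "[") and ret_type.endswith("]"):
--             inner = ret_type[len(wrapper) + 1:-1]
--             if wrapper == "Coroutine":
--                 parts = inner.rsplit(",", 1)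
--                 if len(parts) == 2:
--                     return parts[1].strip()
--             return inner
--     return ret_type
-- ===== SOURCE B (Python) =====
-- def _unwrap_async_return_type(ret_type: str) -> str:
--     """Unwrap async wrapper types: Awaitable[X] -> X, Coroutine[..., X] -> X."""
--     first_open = -1
--     last_comma = -1
--     for i, c in enumerate(ret_type):
--         if c == '[' and first_open == -1:
--             first_open = i
--         elif c == ',':
--             last_comma = i
--     if first_open == -1 or not ret_type.endswith(']'):
--         return ret_type
--     prefix = ret_type[:first_open]
--     if prefix not in ("Awaitable", "Coroutine", "AsyncIterator", "AsyncIterable"):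
--         return ret_type
--     if prefix == "Coroutine" and last_comma > first_open:
--         return ret_type[last_comma + 1:-1].strip()
--     return ret_type[first_open + 1:-1]
-- ===== Notes on version B (the rewrite author's own statement) =====
-- stated objective: alternative
-- what changed: B replaces A's loop of startswith tests over the four wrapper names by a single character pass with two accumulators (index of the first '[' and of the last ','); the wrapper name, the inner part and the Coroutine result component are then all cut directly from those two recorded indices, with no startswith/find/rsplit at all.
import Mathlib
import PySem

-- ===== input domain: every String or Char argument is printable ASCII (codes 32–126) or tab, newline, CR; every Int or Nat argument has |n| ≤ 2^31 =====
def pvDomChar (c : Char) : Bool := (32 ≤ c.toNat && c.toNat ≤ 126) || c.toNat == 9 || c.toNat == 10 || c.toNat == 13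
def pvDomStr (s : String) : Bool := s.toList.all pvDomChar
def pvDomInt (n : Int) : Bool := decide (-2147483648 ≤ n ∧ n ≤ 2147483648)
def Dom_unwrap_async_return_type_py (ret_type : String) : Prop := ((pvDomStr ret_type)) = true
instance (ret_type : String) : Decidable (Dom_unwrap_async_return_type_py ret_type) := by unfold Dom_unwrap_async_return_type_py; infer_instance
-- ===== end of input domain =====

-- B replaces A's loop of startswith tests over the four wrapper names by one character
-- pass recording the index of the first '[' and of the last ','; objective: alternative.

-- ===== PORT A =====
-- hand port of the split point of s.rsplit(",", 1): exact — Python splits at the HIGHEST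
-- index of ',' in s, or not at all if ',' does not occur (then the index below is -1)
def pvLastCommaIdx (k : Nat) (cs : List Char) : Int :=
  match cs with
  | [] => -1
  | c :: r =>
    let t := pvLastCommaIdx (k + 1) r
    if t ≠ -1 then t else if c = ',' then (k : Int) else -1

-- hand port of s.rsplit(",", 1): exact — split at the last ',', else no split
def pvRsplitComma1 (s : String) : List String :=
  let i := pvLastCommaIdx 0 s.toList
  if i == -1 then [s]
  else [PySem.Str.slice s none (some i), PySem.Str.slice s (some (i + 1)) none]

-- the for-loop of A with its early returns, as structural recursion over the wrapper list
def pvUnwrapGo (ws : List String) (ret_type : String) : String :=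
  match ws with
  | [] => ret_type
  | w :: rest =>
    if PySem.Str.startswith ret_type (w ++ "[") && PySem.Str.endswith ret_type "]" then
      let inner := PySem.Str.slice ret_type (some (PySem.Str.len w + 1)) (some (-1))
      if w == "Coroutine" then
        let parts := pvRsplitComma1 inner
        if parts.length == 2 then PySem.Str.strip ((PySem.List.pyGet? parts 1).getD "")
        else inner
      else inner
    else pvUnwrapGo rest ret_type

def unwrap_async_return_type_py (ret_type : String) : String :=
  pvUnwrapGo ["Awaitable", "Coroutine", "AsyncIterator", "AsyncIterable"] ret_type

-- ===== PORT B =====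
-- one step of B's for-loop over enumerate(ret_type): state = (first_open, last_comma)
def pvStep (st : Int × Int) (p : Int × Char) : Int × Int :=
  if p.2 == '[' && st.1 == -1 then (p.1, st.2)
  else if p.2 == ',' then (st.1, p.1)
  else st

def unwrap_async_return_type_py_alt (ret_type : String) : String :=
  let st := (PySem.List.enumerate ret_type.toList 0).foldl pvStep (-1, -1)
  let first_open := st.1
  let last_comma := st.2
  if first_open == -1 || !(PySem.Str.endswith ret_type "]") then ret_type
  else
    let pfx := PySem.Str.slice ret_type none (some first_open)
    if !(["Awaitable", "Coroutine", "AsyncIterator", "AsyncIterable"].contains pfx) then ret_type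
    else if pfx == "Coroutine" && decide (first_open < last_comma) then
      PySem.Str.strip (PySem.Str.slice ret_type (some (last_comma + 1)) (some (-1)))
    else PySem.Str.slice ret_type (some (first_open + 1)) (some (-1))

-- ===== PRECONDITION & SPEC =====
def Spec_unwrap_async_return_type_py (ret_type : String) (out : String) : Prop := out = unwrap_async_return_type_py_alt ret_type
instance (ret_type : String) (out : String) : Decidable (Spec_unwrap_async_return_type_py ret_type out) := by unfold Spec_unwrap_async_return_type_py; infer_instance

-- ===== CLAIM (what is proved, stated in full; the proofs are below) =====
def Claim_equal_unwrap_async_return_type_py : Prop := ∀ (ret_type : String), Dom_unwrap_async_return_type_py ret_type → Spec_unwrap_async_return_type_py ret_type (unwrap_async_return_type_py ret_type)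

-- ===== LEMMAS AND PROOFS =====

-- first '[' index (k-based) of a char list, -1 if absent
def pvFirstOpen (k : Nat) : List Char → Int
  | [] => -1
  | c :: r => if c = '[' then (k : Int) else pvFirstOpen (k + 1) r

-- the fold of B's loop computes (first '[' index, last ',' index)
theorem pv_scan (cs : List Char) (k : Nat) (a b : Int) :
    (PySem.List.enumerate cs (k : Int)).foldl pvStep (a, b) =
      ((if a = -1 then pvFirstOpen k cs else a),
       (if pvLastCommaIdx k cs = -1 then b else pvLastCommaIdx k cs)) := by
  induction cs generalizing k a b with
  | nil => simp [pvFirstOpen, pvLastCommaIdx]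
  | cons c r ih =>
    rw [PySem.List.enumerate_cons, List.foldl_cons]
    have hkk : ((k : Int) + 1) = ((k + 1 : Nat) : Int) := by push_cast; ring
    rw [hkk]
    by_cases hc : c = '['
    · subst hc
      by_cases ha : a = -1
      · subst ha
        have hstep : pvStep (-1, b) ((k : Int), '[') = ((k : Int), b) := by
          simp [pvStep]
        rw [hstep, ih]
        have hk1 : ((k : Int)) ≠ -1 := by omega
        refine Prod.ext ?_ ?_
        · simp [pvFirstOpen]
        · simp only [pvLastCommaIdx]
          split_ifs <;> simp_all
      · have hstep : pvStep (a, b) ((k : Int), '[') = (a, b) := by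
          simp [pvStep, ha]
        rw [hstep, ih]
        refine Prod.ext ?_ ?_
        · simp [ha]
        · simp only [pvLastCommaIdx]
          split_ifs <;> simp_all
    · by_cases hcm : c = ','
      · subst hcm
        have hstep : pvStep (a, b) ((k : Int), ',') = (a, (k : Int)) := by
          simp [pvStep]
        rw [hstep, ih]
        have hk1 : ((k : Int)) ≠ -1 := by omega
        refine Prod.ext ?_ ?_
        · simp [pvFirstOpen]
        · simp only [pvLastCommaIdx]
          split_ifs <;> simp_all
      · have hstep : pvStep (a, b) ((k : Int), c) = (a, b) := by
          simp [pvStep, hc, hcm]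
        rw [hstep, ih]
        refine Prod.ext ?_ ?_
        · simp [pvFirstOpen, hc]
        · simp only [pvLastCommaIdx]
          split_ifs <;> simp_all

-- the fold with the initial state of B's loop
theorem pv_scan0 (cs : List Char) :
    (PySem.List.enumerate cs 0).foldl pvStep (-1, -1) =
      (pvFirstOpen 0 cs, pvLastCommaIdx 0 cs) := by
  have h := pv_scan cs 0 (-1) (-1)
  simp only [Nat.cast_zero] at h
  rw [h]
  refine Prod.ext ?_ ?_
  · simp
  · by_cases hl : pvLastCommaIdx 0 cs = -1 <;> simp [hl]

theorem pv_fo_append (w t : List Char) (k : Nat) (hw : '[' ∉ w) :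
    pvFirstOpen k (w ++ '[' :: t) = ((k + w.length : Nat) : Int) := by
  induction w generalizing k with
  | nil => simp [pvFirstOpen]
  | cons c r ih =>
    have hc : c ≠ '[' := fun h => hw (h ▸ List.mem_cons_self)
    have hr : '[' ∉ r := fun h => hw (List.mem_cons_of_mem _ h)
    simp only [List.cons_append, pvFirstOpen, if_neg hc, ih _ hr]
    congr 1
    simp
    omega

theorem pv_fo_spec (cs : List Char) (k : Nat) (h : pvFirstOpen k cs ≠ -1) :
    ∃ u v, cs = u ++ '[' :: v ∧ pvFirstOpen k cs = ((k + u.length : Nat) : Int) := by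
  induction cs generalizing k with
  | nil => simp [pvFirstOpen] at h
  | cons c r ih =>
    by_cases hc : c = '['
    · exact ⟨[], r, by simp [hc], by simp [pvFirstOpen, hc]⟩
    · simp only [pvFirstOpen, if_neg hc] at h ⊢
      obtain ⟨u, v, hcs, hval⟩ := ih (k + 1) h
      refine ⟨c :: u, v, by simp [hcs], ?_⟩
      rw [hval]
      congr 1
      simp
      omega

theorem pv_lc_nonneg (cs : List Char) (k : Nat) :
    pvLastCommaIdx k cs = -1 ∨ ∃ j : Nat, pvLastCommaIdx k cs = (j : Int) ∧ k ≤ j := by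
  induction cs generalizing k with
  | nil => left; rfl
  | cons c r ih =>
    simp only [pvLastCommaIdx]
    rcases ih (k + 1) with h | ⟨j, hj, hkj⟩
    · rw [h]
      by_cases hc : c = ','
      · right; exact ⟨k, by simp [hc], le_refl k⟩
      · left; simp [hc]
    · right
      refine ⟨j, ?_, by omega⟩
      rw [hj]
      have : ((j : Int)) ≠ -1 := by omega
      simp [this]

theorem pv_lc_append (xs ys : List Char) (k : Nat) :
    pvLastCommaIdx k (xs ++ ys) =
      if pvLastCommaIdx (k + xs.length) ys = -1 then pvLastCommaIdx k xs
      else pvLastCommaIdx (k + xs.length) ys := by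
  induction xs generalizing k with
  | nil => simp [pvLastCommaIdx]
  | cons c r ih =>
    have hlen : k + (c :: r).length = (k + 1) + r.length := by simp; omega
    simp only [List.cons_append, pvLastCommaIdx, ih (k + 1), hlen]
    rcases pv_lc_nonneg ys ((k + 1) + r.length) with hy | ⟨j, hj, _⟩
    · simp [hy]
    · have hne : pvLastCommaIdx ((k+1) + r.length) ys ≠ -1 := by rw [hj]; omega
      simp [hj]

theorem pv_lc_shift (cs : List Char) (k m : Nat) :
    pvLastCommaIdx (k + m) cs =
      if pvLastCommaIdx m cs = -1 then -1 else (k : Int) + pvLastCommaIdx m cs := by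
  induction cs generalizing m with
  | nil => simp [pvLastCommaIdx]
  | cons c r ih =>
    have h1 : (k + m) + 1 = k + (m + 1) := by omega
    simp only [pvLastCommaIdx, h1, ih (m + 1)]
    rcases pv_lc_nonneg r (m + 1) with hr | ⟨j, hj, _⟩
    · simp only [hr, ite_not]
      by_cases hc : c = ','
      · have : ((m:Int)) ≠ -1 := by omega
        simp [hc, this]
      · simp [hc]
    · have hne : pvLastCommaIdx (m + 1) r ≠ -1 := by rw [hj]; omega
      have hne2 : (k : Int) + pvLastCommaIdx (m + 1) r ≠ -1 := by rw [hj]; omega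
      simp [hne, hne2]

-- Python s[a:-1] for a natural a is drop a of dropLast
theorem pv_slice_nat_neg_one (xs : List Char) (a : Nat) :
    PySem.List.slice xs (some (a:Int)) (some (-1)) = xs.dropLast.drop a := by
  simp only [PySem.List.slice, PySem.List.clampIdx]
  rw [if_neg (by omega : ¬ ((a : Int) < 0)), if_pos (by norm_num : (-1:Int) < 0)]
  by_cases he : xs = []
  · subst he; simp
  · have hlen : 1 ≤ xs.length := List.length_pos_iff.mpr he
    rw [if_neg (by omega : ¬ ((xs.length : Int) + -1 < 0))]
    have h2 : ((xs.length : Int) + -1).toNat = xs.length - 1 := by omega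
    have h3 : ((a : Int)).toNat = a := by omega
    rw [h2, h3, List.dropLast_eq_take, List.drop_take]
    by_cases ha : a ≤ xs.length
    · rw [min_eq_left ha]
    · rw [min_eq_right (by omega : xs.length ≤ a)]
      rw [List.drop_length]
      have : xs.length - 1 - a = 0 := by omega
      rw [this]
      simp


-- B unfolded through the scan characterisation
theorem pv_alt_eq (s : String) :
    unwrap_async_return_type_py_alt s =
      (if (pvFirstOpen 0 s.toList) == -1 || !(PySem.Str.endswith s "]") then s
       else
         if !(["Awaitable", "Coroutine", "AsyncIterator", "AsyncIterable"].contains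
             (PySem.Str.slice s none (some (pvFirstOpen 0 s.toList)))) then s
         else if (PySem.Str.slice s none (some (pvFirstOpen 0 s.toList))) == "Coroutine"
             && decide (pvFirstOpen 0 s.toList < pvLastCommaIdx 0 s.toList) then
           PySem.Str.strip (PySem.Str.slice s (some (pvLastCommaIdx 0 s.toList + 1)) (some (-1)))
         else PySem.Str.slice s (some (pvFirstOpen 0 s.toList + 1)) (some (-1))) := by
  unfold unwrap_async_return_type_py_alt
  rw [pv_scan0]

-- the prefix of s before index |w| is w itself
theorem pv_pfx (s w : String) (t : List Char) (hs : s.toList = w.toList ++ '[' :: t) :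
    PySem.Str.slice s none (some ((w.toList.length : Nat) : Int)) = w := by
  apply String.toList_inj.mp
  rw [PySem.Str.toList_slice, PySem.Chars.slice_eq_listSlice, hs,
      PySem.List.slice_to_natCast]
  simp

-- B on a string matching a non-Coroutine wrapper
theorem pv_pos (s w : String)
    (hmem : (["Awaitable", "Coroutine", "AsyncIterator", "AsyncIterable"].contains w) = true)
    (hw : '[' ∉ w.toList) (hwc : (w == "Coroutine") = false)
    (he : PySem.Str.endswith s "]" = true)
    (h : PySem.Str.startswith s (w ++ "[") = true) :
    unwrap_async_return_type_py_alt s =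
      PySem.Str.slice s (some (PySem.Str.len w + 1)) (some (-1)) := by
  rw [PySem.Str.startswith_eq, PySem.Chars.startswith_iff] at h
  obtain ⟨t, ht⟩ := h
  rw [String.toList_append] at ht
  have hs : s.toList = w.toList ++ '[' :: t := by rw [← ht]; simp
  have hfo : pvFirstOpen 0 s.toList = ((w.toList.length : Nat) : Int) := by
    rw [hs]
    have := pv_fo_append w.toList t 0 hw
    simpa using this
  rw [pv_alt_eq, hfo, pv_pfx s w t hs]
  have h1 : ((((w.toList.length : Nat) : Int)) == -1) = false := by simp
  rw [h1, he, hmem, hwc]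
  have hlen : PySem.Str.len w = ((w.toList.length : Nat) : Int) := by
    simp [PySem.Str.len_eq]
  rw [hlen]
  simp

-- B on a string matching Coroutine[...]
theorem pv_pos_coro (s : String)
    (he : PySem.Str.endswith s "]" = true)
    (h : PySem.Str.startswith s ("Coroutine" ++ "[") = true) :
    unwrap_async_return_type_py_alt s =
      (let inner := PySem.Str.slice s (some (PySem.Str.len "Coroutine" + 1)) (some (-1))
       let parts := pvRsplitComma1 inner
       if parts.length == 2 then PySem.Str.strip ((PySem.List.pyGet? parts 1).getD "")
       else inner) := by
  have h' := h
  rw [PySem.Str.startswith_eq, PySem.Chars.startswith_iff] at h'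
  obtain ⟨t, ht⟩ := h'
  rw [String.toList_append] at ht
  have hs : s.toList = "Coroutine".toList ++ '[' :: t := by rw [← ht]; simp
  have he' := he
  rw [PySem.Str.endswith_eq, PySem.Chars.endswith_iff] at he'
  obtain ⟨p, hp⟩ := he'
  rw [show ("]" : String).toList = [']'] from rfl] at hp
  rcases List.eq_nil_or_concat t with h0 | ⟨q, x, rfl⟩
  swap
  rw [List.concat_eq_append] at hs ht
  case inl =>
    exfalso
    rw [h0] at hs
    rw [hs] at hp
    have h1 := congrArg List.getLast? hp
    simp at h1
  have hx : x = ']' := by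
    have h1 := congrArg List.getLast? hp
    rw [List.getLast?_concat, hs] at h1
    rw [show "Coroutine".toList ++ '[' :: (q ++ [x]) =
        ("Coroutine".toList ++ ('[' :: q)) ++ [x] from by simp,
      List.getLast?_concat] at h1
    exact (Option.some_inj.mp h1).symm
  subst hx
  have hfo : pvFirstOpen 0 s.toList = ((9 : Nat) : Int) := by
    rw [hs]
    have h2 := pv_fo_append "Coroutine".toList (q ++ [']']) 0 (by decide)
    simpa using h2
  have hsplit : s.toList = "Coroutine[".toList ++ (q ++ [']']) := by
    rw [hs]; rfl
  have hlc : pvLastCommaIdx 0 s.toList =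
      (if pvLastCommaIdx 0 q = -1 then -1 else 10 + pvLastCommaIdx 0 q) := by
    rw [hsplit, pv_lc_append]
    have hC : pvLastCommaIdx 0 ("Coroutine[".toList) = -1 := by decide
    have hlen10 : 0 + ("Coroutine[".toList).length = 10 := by decide
    rw [hlen10, pv_lc_append q [']'] 10]
    have hrb : pvLastCommaIdx (10 + q.length) [']'] = -1 := by
      simp [pvLastCommaIdx]
    rw [hrb, if_pos rfl, hC]
    have hshift : pvLastCommaIdx 10 q =
        (if pvLastCommaIdx 0 q = -1 then -1 else 10 + pvLastCommaIdx 0 q) := by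
      simpa using pv_lc_shift q 10 0
    rw [hshift]
    rcases pv_lc_nonneg q 0 with hq | ⟨j, hj, _⟩
    · simp [hq]
    · have : pvLastCommaIdx 0 q ≠ -1 := by rw [hj]; omega
      have h10 : (10 : Int) + pvLastCommaIdx 0 q ≠ -1 := by rw [hj]; omega
      simp [this, h10]
  have hdl : s.toList.dropLast = "Coroutine[".toList ++ q := by
    rw [hsplit, ← List.append_assoc, List.dropLast_concat]
  have hinner : (PySem.Str.slice s (some (PySem.Str.len "Coroutine" + 1)) (some (-1))).toList
      = q := by
    rw [show PySem.Str.len "Coroutine" + 1 = ((10 : Nat) : Int) from by decide]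
    rw [PySem.Str.toList_slice, PySem.Chars.slice_eq_listSlice, pv_slice_nat_neg_one, hdl]
    rw [show (10 : Nat) = ("Coroutine[".toList).length from rfl, List.drop_left]
  have hpfx9 : PySem.Str.slice s none (some ((9 : Nat) : Int)) = "Coroutine" :=
    pv_pfx s "Coroutine" (q ++ [']']) hs
  rw [pv_alt_eq, hfo, hpfx9, he]
  have h1 : ((((9 : Nat) : Int)) == -1) = false := by decide
  rw [h1]
  simp only [Bool.or_self, Bool.not_true, Bool.false_eq_true, if_false,
    BEq.refl, Bool.true_and]
  have hcont : (["Awaitable", "Coroutine", "AsyncIterator", "AsyncIterable"].contains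
      ("Coroutine" : String)) = true := by decide
  rw [hcont]
  simp only [Bool.not_true, Bool.false_eq_true, if_false]
  rw [hlc]
  simp only [pvRsplitComma1, hinner]
  rcases pv_lc_nonneg q 0 with hq | ⟨j, hj, _⟩
  · rw [hq]
    rw [show PySem.Str.len "Coroutine" = ((9 : Nat) : Int) from by decide]
    norm_num
  · rw [hj]
    rw [if_neg (by omega : ¬ ((j : Int)) = -1)]
    rw [show (decide (((9 : Nat) : Int) < 10 + (j : Int))) = true from by
      simp only [decide_eq_true_eq]; omega]
    rw [show (((j : Int)) == -1) = false from beq_eq_false_iff_ne.mpr (by omega)]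
    norm_num
    have hinner' : (PySem.Str.slice s (some ((("Coroutine" : String).length : Int) + 1))
        (some (-1))).toList = q := hinner
    apply congrArg PySem.Str.strip
    apply String.toList_inj.mp
    rw [PySem.Str.toList_slice, PySem.Chars.slice_eq_listSlice,
        show (10 + (j : Int) + 1) = (((11 + j : Nat)) : Int) from by push_cast; ring,
        pv_slice_nat_neg_one, hdl]
    rw [PySem.Str.toList_slice, PySem.Chars.slice_eq_listSlice, hinner',
        show ((j : Int) + 1) = (((j + 1 : Nat)) : Int) from by push_cast; ring,
        PySem.List.slice_from_natCast]
    have hL : ("Coroutine[".toList).length = 10 := by rfl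
    rw [show (11 + j) = ("Coroutine[".toList).length + (1 + j) from by rw [hL]; omega, List.drop_append,
        Nat.add_comm 1 j]
    rw [hL, show (10 : Nat) + (j + 1) - 10 = j + 1 from by omega,
        List.drop_eq_nil_of_le (by rw [hL]; omega), List.nil_append]

-- when no wrapper prefix matches, B returns the input unchanged
theorem pv_neg (s : String)
    (hne : ∀ w ∈ (["Awaitable", "Coroutine", "AsyncIterator", "AsyncIterable"] : List String),
      PySem.Str.startswith s (w ++ "[") = false) :
    unwrap_async_return_type_py_alt s = s := by
  rw [pv_alt_eq]
  by_cases he : PySem.Str.endswith s "]" = true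
  swap
  · rw [Bool.not_eq_true] at he
    rw [he]
    simp
  rw [he]
  by_cases hfo : pvFirstOpen 0 s.toList = -1
  · rw [hfo]
    simp
  · obtain ⟨u, v, hcs, hval⟩ := pv_fo_spec s.toList 0 hfo
    have huval : pvFirstOpen 0 s.toList = ((u.length : Nat) : Int) := by simpa using hval
    have hne1 : ((pvFirstOpen 0 s.toList) == -1) = false := by
      rw [huval]; simp
    rw [hne1]
    simp only [Bool.or_false, Bool.false_eq_true, if_false, Bool.not_true]
    by_cases hm : (["Awaitable", "Coroutine", "AsyncIterator", "AsyncIterable"].contains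
        (PySem.Str.slice s none (some (pvFirstOpen 0 s.toList)))) = true
    swap
    · rw [Bool.not_eq_true] at hm
      rw [hm]
      simp
    exfalso
    have hwmem : (PySem.Str.slice s none (some (pvFirstOpen 0 s.toList))) ∈
        (["Awaitable", "Coroutine", "AsyncIterator", "AsyncIterable"] : List String) :=
      List.contains_iff_mem.mp hm
    have hwl : (PySem.Str.slice s none (some (pvFirstOpen 0 s.toList))).toList = u := by
      rw [PySem.Str.toList_slice, PySem.Chars.slice_eq_listSlice, huval,
          PySem.List.slice_to_natCast, hcs, List.take_left]
    have hsw := hne _ hwmem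
    have htrue : PySem.Str.startswith s
        ((PySem.Str.slice s none (some (pvFirstOpen 0 s.toList))) ++ "[") = true := by
      rw [PySem.Str.startswith_eq, PySem.Chars.startswith_iff, String.toList_append, hwl, hcs]
      exact ⟨v, by simp⟩
    rw [htrue] at hsw
    exact Bool.true_eq_false.mp hsw

theorem pv_main (s : String) :
    unwrap_async_return_type_py s = unwrap_async_return_type_py_alt s := by
  by_cases he : PySem.Str.endswith s "]" = true
  swap
  · rw [Bool.not_eq_true] at he
    have halt : unwrap_async_return_type_py_alt s = s := by
      rw [pv_alt_eq, he]; simp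
    rw [halt]
    simp only [unwrap_async_return_type_py, pvUnwrapGo, he, Bool.and_false, Bool.false_eq_true,
      if_false]
  by_cases h1 : PySem.Str.startswith s ("Awaitable" ++ "[") = true
  · rw [pv_pos s "Awaitable" (by decide) (by decide) (by decide) he h1]
    simp only [unwrap_async_return_type_py, pvUnwrapGo, h1, he, Bool.and_self, if_true]
    rw [show (("Awaitable" : String) == "Coroutine") = false from by decide]
    simp only [Bool.false_eq_true, if_false]
  by_cases h2 : PySem.Str.startswith s ("Coroutine" ++ "[") = true
  · rw [pv_pos_coro s he h2]
    rw [Bool.not_eq_true] at h1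
    simp only [unwrap_async_return_type_py, pvUnwrapGo, h1, h2, he, Bool.false_and,
      Bool.false_eq_true, if_false, Bool.and_self, if_true]
    rw [show (("Coroutine" : String) == "Coroutine") = true from by decide]
    simp only [if_true]
  by_cases h3 : PySem.Str.startswith s ("AsyncIterator" ++ "[") = true
  · rw [pv_pos s "AsyncIterator" (by decide) (by decide) (by decide) he h3]
    rw [Bool.not_eq_true] at h1 h2
    simp only [unwrap_async_return_type_py, pvUnwrapGo, h1, h2, h3, he, Bool.false_and,
      Bool.false_eq_true, if_false, Bool.and_self, if_true]
    rw [show (("AsyncIterator" : String) == "Coroutine") = false from by decide]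
    simp only [Bool.false_eq_true, if_false]
  by_cases h4 : PySem.Str.startswith s ("AsyncIterable" ++ "[") = true
  · rw [pv_pos s "AsyncIterable" (by decide) (by decide) (by decide) he h4]
    rw [Bool.not_eq_true] at h1 h2 h3
    simp only [unwrap_async_return_type_py, pvUnwrapGo, h1, h2, h3, h4, he, Bool.false_and,
      Bool.false_eq_true, if_false, Bool.and_self, if_true]
    rw [show (("AsyncIterable" : String) == "Coroutine") = false from by decide]
    simp only [Bool.false_eq_true, if_false]
  · rw [Bool.not_eq_true] at h1 h2 h3 h4
    rw [pv_neg s (by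
      intro w hwm
      fin_cases hwm
      · exact h1
      · exact h2
      · exact h3
      · exact h4)]
    simp only [unwrap_async_return_type_py, pvUnwrapGo, h1, h2, h3, h4, Bool.false_and,
      Bool.false_eq_true, if_false]

-- ===== VERDICT (by name: the statement is the Claim_ definition above) =====
theorem unwrap_async_return_type_py_spec : Claim_equal_unwrap_async_return_type_py := by
  intro s _
  exact pv_main s
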